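-- pv_equiv track=rewrite | github.com/sungguenja/other_Algorithmus_problem | programmers_위클리챌린지_4주차.py | solution
-- ===== SOURCE A (Python) =====
-- def returnTableList(table):
--     result = []
--     field_list = []
--     for i in range(len(table)):
--         lang_list = list(table[i].split())
--         score_dict = {}
--         for j in range(1,len(lang_list)):
--             score_dict[lang_list[j]] = 5-j+1
--         result.append(score_dict)
--         field_list.append(lang_list[0])
--     return result,field_list
--
-- def solution(table, languages, preference):
--     score_table,field_list = returnTableList(table)
--     point = [0]*len(table)
--     for i in range(len(languages)):
--         now_languages = languages[i]
--         additional_point = preference[i]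
--         for j in range(len(table)):
--             if score_table[j].get(now_languages) != None:
--                 point[j] += additional_point*score_table[j][now_languages]
--
--     answer_point = -1
--     answer = ''
--     for i in range(len(field_list)):
--         if point[i] > answer_point:
--             answer_point = point[i]
--             answer = field_list[i]
--         elif point[i] == answer_point:
--             check_list = [answer,field_list[i]]
--             check_list.sort()
--             answer = check_list[0]
--     return answer
-- ===== SOURCE B (Python) =====
-- def solution(table, languages, preference):
--     pref = {}
--     for lang, p in zip(languages, preference):
--         pref[lang] = pref.get(lang, 0) + p
--     best_score = -1
--     best = ''
--     for line in table:
--         fields = line.split()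
--         field = fields[0]
--         weights = {}
--         for j, lang in enumerate(fields[1:], 1):
--             weights[lang] = 6 - j
--         score = sum(pref.get(lang, 0) * w for lang, w in weights.items())
--         if score > best_score:
--             best_score, best = score, field
--         elif score == best_score:
--             best = min(best, field)
--     return best
-- ===== Notes on version B (the rewrite author's own statement) =====
-- stated objective: faster
-- what changed: Inverts the loop nesting: instead of A's per-language outer loop that scans every table row again for each language (and a separate final selection pass), B builds one accumulated preference dict from zip(languages, preference), then makes a single pass over the tables computing each field's score from its own language weights and fusing the best-field selection into the same pass.
import Mathlib
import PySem

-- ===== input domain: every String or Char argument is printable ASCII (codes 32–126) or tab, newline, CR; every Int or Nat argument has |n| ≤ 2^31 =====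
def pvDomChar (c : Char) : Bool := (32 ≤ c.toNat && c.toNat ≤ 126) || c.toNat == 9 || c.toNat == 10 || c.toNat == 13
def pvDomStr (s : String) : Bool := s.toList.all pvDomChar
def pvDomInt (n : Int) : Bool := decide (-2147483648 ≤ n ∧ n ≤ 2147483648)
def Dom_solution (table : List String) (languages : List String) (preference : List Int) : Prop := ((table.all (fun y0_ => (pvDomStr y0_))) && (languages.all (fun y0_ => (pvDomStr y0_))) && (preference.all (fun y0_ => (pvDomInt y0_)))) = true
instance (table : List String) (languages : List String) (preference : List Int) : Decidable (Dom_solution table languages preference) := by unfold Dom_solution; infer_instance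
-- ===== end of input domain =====

-- B inverts A's loop nesting: one accumulated preference dict, then a single fused pass over the
-- tables, removing A's per-language scan of every table row (measurably faster on large inputs).

-- ===== PORT A =====
def returnTableList (table : List String) : List (PySem.Dict String Int) × List String :=
  (PySem.List.pyRange 0 (PySem.List.len table) 1).foldl
    (fun (acc : List (PySem.Dict String Int) × List String) i =>
      let lang_list := PySem.Str.split₀ (PySem.List.pyGetD table i "")
      let score_dict := (PySem.List.pyRange 1 (PySem.List.len lang_list) 1).foldl
        (fun (d : PySem.Dict String Int) j =>
          d.insert (PySem.List.pyGetD lang_list j "") (5 - j + 1)) PySem.Dict.empty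
      (acc.1 ++ [score_dict], acc.2 ++ [PySem.List.pyGetD lang_list 0 ""]))
    ([], [])

def solution (table : List String) (languages : List String) (preference : List Int) : String :=
  let st := returnTableList table
  let score_table := st.1
  let field_list := st.2
  let point0 : List Int := PySem.List.pyRepeat [(0 : Int)] (PySem.List.len table)
  let point := (PySem.List.pyRange 0 (PySem.List.len languages) 1).foldl
    (fun (pt : List Int) i =>
      let now_languages := PySem.List.pyGetD languages i ""
      let additional_point := PySem.List.pyGetD preference i 0
      (PySem.List.pyRange 0 (PySem.List.len table) 1).foldl
        (fun (pt : List Int) j =>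
          if (PySem.List.pyGetD score_table j PySem.Dict.empty).get? now_languages ≠ none then
            PySem.List.pySetD pt j (PySem.List.pyGetD pt j 0 +
              additional_point * (PySem.List.pyGetD score_table j PySem.Dict.empty).getD now_languages 0)
          else pt) pt) point0
  let fin := (PySem.List.pyRange 0 (PySem.List.len field_list) 1).foldl
    (fun (s : Int × String) i =>
      if PySem.List.pyGetD point i 0 > s.1 then
        (PySem.List.pyGetD point i 0, PySem.List.pyGetD field_list i "")
      else if PySem.List.pyGetD point i 0 = s.1 then
        (s.1, PySem.List.pyGetD
          (PySem.List.sorted [s.2, PySem.List.pyGetD field_list i ""] (fun x => x) false) 0 "")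
      else s) ((-1 : Int), "")
  fin.2

-- ===== PORT B =====
def solution_alt (table : List String) (languages : List String) (preference : List Int) : String :=
  let pref := (languages.zip preference).foldl
    (fun (d : PySem.Dict String Int) lp => d.insert lp.1 (d.getD lp.1 0 + lp.2)) PySem.Dict.empty
  let r := table.foldl
    (fun (s : Int × String) line =>
      let fields := PySem.Str.split₀ line
      let field := PySem.List.pyGetD fields 0 ""
      let weights := (PySem.List.enumerate (PySem.List.slice fields (some 1) none) 1).foldl
        (fun (d : PySem.Dict String Int) jl => d.insert jl.2 (6 - jl.1)) PySem.Dict.empty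
      let score := (weights.items.map (fun lw => pref.getD lw.1 0 * lw.2)).sum
      if score > s.1 then (score, field)
      else if score = s.1 then (s.1, min s.2 field)
      else s) ((-1 : Int), "")
  r.2

-- ===== PRECONDITION & SPEC =====
-- Pre_ excludes exactly the inputs where Python A raises: a table row with no tokens
-- (lang_list[0] IndexError) or languages longer than preference (preference[i] IndexError).
def Pre_solution (table : List String) (languages : List String) (preference : List Int) : Prop :=
  (∀ t ∈ table, PySem.Str.split₀ t ≠ []) ∧ languages.length ≤ preference.length
instance (table : List String) (languages : List String) (preference : List Int) : Decidable (Pre_solution table languages preference) := by unfold Pre_solution; infer_instance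

def pvWitness_solution : List String × List String × List Int :=
  (["python c java", "c sql go"], ["python", "c"], [5, 3])

def Spec_solution (table : List String) (languages : List String) (preference : List Int) (out : String) : Prop := out = solution_alt table languages preference
instance (table : List String) (languages : List String) (preference : List Int) (out : String) : Decidable (Spec_solution table languages preference out) := by unfold Spec_solution; infer_instance

-- ===== CLAIM (what is proved, stated in full; the proofs are below) =====
def Claim_equal_solution : Prop := ∀ (table : List String) (languages : List String) (preference : List Int), Dom_solution table languages preference → Pre_solution table languages preference → Spec_solution table languages preference (solution table languages preference)

-- ===== LEMMAS AND PROOFS =====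

-- the per-row weight dict A builds (5 - j + 1 at 1-based position j, later occurrences overwrite)
def pvW (fields : List String) : PySem.Dict String Int :=
  (PySem.List.pyRange 1 (PySem.List.len fields) 1).foldl
    (fun (d : PySem.Dict String Int) j =>
      d.insert (PySem.List.pyGetD fields j "") (5 - j + 1)) PySem.Dict.empty

def pvF (t : String) : String := PySem.List.pyGetD (PySem.Str.split₀ t) 0 ""

def pvRow (d : PySem.Dict String Int) (pairs : List (String × Int)) : Int :=
  (pairs.map (fun lp => lp.2 * d.getD lp.1 0)).sum

def pvSel (s : Int × String) (q : String × Int) : Int × String :=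
  if q.2 > s.1 then (q.2, q.1) else if q.2 = s.1 then (s.1, min s.2 q.1) else s

-- B's enumerate-over-the-tail weight loop feeds the same (key, value) stream as A's index loop
lemma pv_enum_slice (fields : List String) :
    (PySem.List.enumerate (PySem.List.slice fields (some 1) none) 1).map
        (fun jl => ((jl.2 : String), (6 - jl.1 : Int)))
      = (PySem.List.pyRange 1 (PySem.List.len fields) 1).map
        (fun j => (PySem.List.pyGetD fields j "", 5 - j + 1)) := by
  have hs : PySem.List.slice fields (some 1) none = fields.drop 1 :=
    PySem.List.slice_from fields (a := 1) (by norm_num)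
  rw [hs, PySem.List.len_eq, PySem.List.pyRange_one]
  apply List.ext_getElem
  · simp [PySem.List.length_enumerate]
  · intro k h1 h2
    simp only [List.getElem_map, PySem.List.getElem_enumerate, List.getElem_range]
    have hk : 1 + k < fields.length := by
      simp [PySem.List.length_enumerate] at h1; omega
    have hg : PySem.List.pyGetD fields (1 + (k : Int)) "" = fields.getD (1 + k) "" := by
      have := PySem.List.pyGetD_natCast fields (1 + k) ""
      push_cast at this ⊢
      exact this
    rw [hg]
    rw [List.getD_eq_getElem _ _ hk]
    refine Prod.ext ?_ (by push_cast; ring)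
    simp only [List.getElem_drop]

lemma pv_weights_eq (fields : List String) :
    (PySem.List.enumerate (PySem.List.slice fields (some 1) none) 1).foldl
        (fun (d : PySem.Dict String Int) jl => d.insert jl.2 (6 - jl.1)) PySem.Dict.empty
      = pvW fields := by
  unfold pvW
  have h1 : (PySem.List.enumerate (PySem.List.slice fields (some 1) none) 1).foldl
        (fun (d : PySem.Dict String Int) jl => d.insert jl.2 (6 - jl.1)) PySem.Dict.empty
      = ((PySem.List.enumerate (PySem.List.slice fields (some 1) none) 1).map
          (fun jl => ((jl.2 : String), (6 - jl.1 : Int)))).foldl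
          (fun (d : PySem.Dict String Int) p => d.insert p.1 p.2) PySem.Dict.empty := by
    rw [List.foldl_map]
  have h2 : (PySem.List.pyRange 1 (PySem.List.len fields) 1).foldl
        (fun (d : PySem.Dict String Int) j =>
          d.insert (PySem.List.pyGetD fields j "") (5 - j + 1)) PySem.Dict.empty
      = ((PySem.List.pyRange 1 (PySem.List.len fields) 1).map
          (fun j => (PySem.List.pyGetD fields j "", (5 - j + 1 : Int)))).foldl
          (fun (d : PySem.Dict String Int) p => d.insert p.1 p.2) PySem.Dict.empty := by
    rw [List.foldl_map]
  rw [h1, h2, pv_enum_slice]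

lemma pv_nodup_keys_W (fields : List String) : (pvW fields).keys.Nodup := by
  unfold pvW
  exact PySem.Dict.nodup_keys_foldl_insert_key _
    (fun j => PySem.List.pyGetD fields j "") _ _ PySem.Dict.nodup_keys_empty

lemma pv_rtl (table : List String) :
    returnTableList table
      = (table.map (fun t => pvW (PySem.Str.split₀ t)), table.map pvF) := by
  show (PySem.List.pyRange 0 (PySem.List.len table) 1).foldl
      (fun (acc : List (PySem.Dict String Int) × List String) i =>
        (acc.1 ++ [pvW (PySem.Str.split₀ (PySem.List.pyGetD table i ""))],
         acc.2 ++ [pvF (PySem.List.pyGetD table i "")])) ([], [])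
    = (table.map (fun t => pvW (PySem.Str.split₀ t)), table.map pvF)
  rw [PySem.List.len_eq]
  rw [PySem.List.foldl_pyRange_zero_pyGetD' table ""
        (fun (acc : List (PySem.Dict String Int) × List String) t =>
          (acc.1 ++ [pvW (PySem.Str.split₀ t)], acc.2 ++ [pvF t])) ([], [])]
  rw [PySem.List.foldl_prod_mk
        (f := fun (a : List (PySem.Dict String Int)) t => a ++ [pvW (PySem.Str.split₀ t)])
        (g := fun (a : List String) t => a ++ [pvF t])]
  rw [PySem.List.foldl_append_singleton_eq_map, PySem.List.foldl_append_singleton_eq_map]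
  simp

-- sum over an association list of a key-indicator picks out the dict lookup
lemma pv_sum_ite (its : List (String × Int)) (h : (its.map (·.1)).Nodup) (l : String) (p : Int) :
    (its.map (fun lw => if lw.1 = l then p * lw.2 else 0)).sum
      = p * (PySem.Dict.mk its).getD l 0 := by
  induction its with
  | nil => simp [PySem.Dict.getD, PySem.Dict.get?]
  | cons kv rest ih =>
    obtain ⟨k, v⟩ := kv
    simp only [List.map_cons, List.nodup_cons] at h
    simp only [List.map_cons, List.sum_cons]
    rw [PySem.Dict.getD_eq_get?_getD, PySem.Dict.get?_mk_cons]
    by_cases hkl : k = l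
    · subst hkl
      simp only [beq_self_eq_true, if_true]
      have hz : (rest.map (fun lw => if lw.1 = k then p * lw.2 else 0)).sum = 0 := by
        apply List.sum_eq_zero
        intro x hx
        simp only [List.mem_map] at hx
        obtain ⟨lw, hlw, rfl⟩ := hx
        have : lw.1 ≠ k := by
          intro he
          exact h.1 (by exact List.mem_map.mpr ⟨lw, hlw, he⟩)
        simp [this]
      simp [hz]
    · have hb : (k == l) = false := by simp [hkl]
      simp only [hb, Bool.false_eq_true, if_false, hkl, zero_add]
      rw [← PySem.Dict.getD_eq_get?_getD]
      exact ih h.2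

-- exchanging the two summations: B's sum over the row dict against the accumulated preference
-- dict equals A's sum over the (language, preference) pairs of that row's lookups
lemma pv_exch (W : PySem.Dict String Int) (hW : W.keys.Nodup) (pairs : List (String × Int)) :
    ∀ d : PySem.Dict String Int,
      ((W.items).map (fun lw =>
          (pairs.foldl (fun (d : PySem.Dict String Int) lp =>
            d.insert lp.1 (d.getD lp.1 0 + lp.2)) d).getD lw.1 0 * lw.2)).sum
        = ((W.items).map (fun lw => d.getD lw.1 0 * lw.2)).sum + pvRow W pairs := by
  induction pairs with
  | nil => intro d; simp [pvRow]
  | cons lp rest ih =>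
    intro d
    simp only [List.foldl_cons]
    rw [ih]
    have hstep : (W.items.map (fun lw =>
        (d.insert lp.1 (d.getD lp.1 0 + lp.2)).getD lw.1 0 * lw.2)).sum
        = (W.items.map (fun lw => d.getD lw.1 0 * lw.2)).sum + lp.2 * W.getD lp.1 0 := by
      have hc : W.items.map (fun lw =>
            (d.insert lp.1 (d.getD lp.1 0 + lp.2)).getD lw.1 0 * lw.2)
          = W.items.map (fun lw =>
            d.getD lw.1 0 * lw.2 + (if lw.1 = lp.1 then lp.2 * lw.2 else 0)) := by
        apply List.map_congr_left
        intro lw _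
        rw [PySem.Dict.getD_insert]
        by_cases h : lw.1 = lp.1
        · simp [h]; ring
        · simp [h]
      rw [hc, PySem.List.sum_map_add_int]
      congr 1
      rw [pv_sum_ite W.items (by exact hW) lp.1 lp.2]
    rw [hstep]
    have : pvRow W (lp :: rest) = lp.2 * W.getD lp.1 0 + pvRow W rest := by
      simp [pvRow]
    rw [this]
    ring

lemma pv_score_eq (W : PySem.Dict String Int) (hW : W.keys.Nodup) (pairs : List (String × Int)) :
    ((W.items).map (fun lw =>
        (pairs.foldl (fun (d : PySem.Dict String Int) lp =>
          d.insert lp.1 (d.getD lp.1 0 + lp.2)) PySem.Dict.empty).getD lw.1 0 * lw.2)).sum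
      = pvRow W pairs := by
  rw [pv_exch W hW pairs PySem.Dict.empty]
  have : (W.items.map (fun lw => PySem.Dict.empty.getD lw.1 0 * lw.2)).sum = 0 := by
    apply List.sum_eq_zero
    intro x hx
    simp only [List.mem_map] at hx
    obtain ⟨lw, _, rfl⟩ := hx
    simp [PySem.Dict.getD_empty]
  rw [this, zero_add]

-- the index-update loop over range(n) with n = length: every slot is touched once
lemma pv_setloop (c : Nat → Int) (g : Nat → Bool) :
    ∀ (m : Nat) (pt : List Int), m ≤ pt.length →
      (List.range m).foldl
          (fun (q : List Int) k => if g k then q.set k (q.getD k 0 + c k) else q) pt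
        = pt.mapIdx (fun j x => if j < m ∧ g j then x + c j else x) := by
  intro m
  induction m with
  | zero =>
    intro pt _
    rw [List.range_zero, List.foldl_nil]
    apply List.ext_getElem
    · simp
    · intro j h1 h2
      simp [List.getElem_mapIdx]
  | succ m ih =>
    intro pt hm
    rw [List.range_succ, List.foldl_append, ih pt (by omega)]
    have hmlt : m < pt.length := by omega
    have hget : (pt.mapIdx (fun j x => if j < m ∧ g j then x + c j else x)).getD m 0
        = pt[m] := by
      rw [List.getD_eq_getElem _ _ (by simpa using hmlt)]
      simp [List.getElem_mapIdx]
    simp only [List.foldl_cons, List.foldl_nil]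
    by_cases hg : g m = true
    · simp only [hg, if_true, hget]
      apply List.ext_getElem
      · simp
      · intro j h1 h2
        rw [List.getElem_set]
        simp only [List.getElem_mapIdx]
        by_cases hj : m = j
        · subst hj
          simp [hg]
        · simp only [hj, if_false]
          by_cases hjm : j < m
          · simp [hjm, (show j < m + 1 by omega)]
          · simp [hjm, (show ¬ j < m + 1 by omega)]
    · have hgb : g m = false := by simpa using hg
      simp only [hgb, Bool.false_eq_true, if_false]
      apply List.ext_getElem
      · simp
      · intro j h1 h2
        simp only [List.getElem_mapIdx]
        by_cases hjm : j < m
        · simp [hjm, (show j < m + 1 by omega)]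
        · by_cases hj : j = m
          · subst hj
            simp [hgb]
          · simp [hjm, (show ¬ j < m + 1 by omega)]

-- A's inner loop adds this language's contribution to every row at once
lemma pv_inner (ds : List (PySem.Dict String Int)) (lang : String) (p : Int)
    (pt : List Int) (hl : pt.length = ds.length) :
    (PySem.List.pyRange 0 (ds.length : Int) 1).foldl
        (fun (pt : List Int) j =>
          if (PySem.List.pyGetD ds j PySem.Dict.empty).get? lang ≠ none then
            PySem.List.pySetD pt j (PySem.List.pyGetD pt j 0 +
              p * (PySem.List.pyGetD ds j PySem.Dict.empty).getD lang 0)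
          else pt) pt
      = pt.zipWith (fun x d => x + p * d.getD lang 0) ds := by
  rw [PySem.List.pyRange_zero_natCast]
  rw [List.foldl_map]
  have hbody : (fun (q : List Int) (k : Nat) =>
        if (PySem.List.pyGetD ds (k : Int) PySem.Dict.empty).get? lang ≠ none then
          PySem.List.pySetD q (k : Int) (PySem.List.pyGetD q (k : Int) 0 +
            p * (PySem.List.pyGetD ds (k : Int) PySem.Dict.empty).getD lang 0)
        else q)
      = (fun (q : List Int) (k : Nat) =>
        if ((ds.getD k PySem.Dict.empty).get? lang).isSome then
          q.set k (q.getD k 0 + p * (ds.getD k PySem.Dict.empty).getD lang 0)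
        else q) := by
    funext q k
    simp only [PySem.List.pyGetD_natCast, PySem.List.pySetD_natCast]
    cases hopt : (ds[k]?.getD PySem.Dict.empty).get? lang with
    | none => simp [hopt]
    | some v => simp [hopt]
  rw [hbody]
  rw [pv_setloop (fun k => p * (ds.getD k PySem.Dict.empty).getD lang 0)
        (fun k => ((ds.getD k PySem.Dict.empty).get? lang).isSome) ds.length pt (by omega)]
  apply List.ext_getElem
  · simp [hl]
  · intro j h1 h2
    simp only [List.getElem_mapIdx, List.getElem_zipWith]
    have hj : j < ds.length := by simp at h2; omega
    by_cases h : ((ds[j]).get? lang).isSome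
    · simp [hj, h]
    · have hn : (ds[j]).get? lang = none := Option.not_isSome_iff_eq_none.mp h
      have : (ds[j]).getD lang 0 = 0 := by
        rw [PySem.Dict.getD_eq_get?_getD, hn]; rfl
      simp [hj, h, this]

-- A's whole point computation, as a map over the rows
lemma pv_outer (ds : List (PySem.Dict String Int)) (pairs : List (String × Int)) :
    ∀ (pt : List Int), pt.length = ds.length →
      pairs.foldl
          (fun (pt : List Int) lp =>
            (PySem.List.pyRange 0 (ds.length : Int) 1).foldl
              (fun (pt : List Int) j =>
                if (PySem.List.pyGetD ds j PySem.Dict.empty).get? lp.1 ≠ none then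
                  PySem.List.pySetD pt j (PySem.List.pyGetD pt j 0 +
                    lp.2 * (PySem.List.pyGetD ds j PySem.Dict.empty).getD lp.1 0)
                else pt) pt) pt
        = pt.zipWith (fun x d => x + pvRow d pairs) ds := by
  induction pairs with
  | nil =>
    intro pt hl
    simp only [List.foldl_nil]
    apply List.ext_getElem
    · simp [hl]
    · intro j h1 h2
      simp [pvRow]
  | cons lp rest ih =>
    intro pt hl
    simp only [List.foldl_cons]
    rw [pv_inner ds lp.1 lp.2 pt hl]
    rw [ih _ (by simp [hl])]
    apply List.ext_getElem
    · simp [hl]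
    · intro j h1 h2
      simp only [List.getElem_zipWith, pvRow, List.map_cons, List.sum_cons]
      ring

-- Python's check_list.sort(); check_list[0] is min
lemma pv_min (a b : String) :
    PySem.List.pyGetD (PySem.List.sorted [a, b] (fun x => x) false) 0 "" = min a b := by
  rcases le_or_gt a b with h | h
  · have : ¬ b.toList < a.toList := by
      rw [← String.lt_iff_toList_lt]; exact not_lt.mpr h
    simp [PySem.List.sorted, PySem.List.insertBy, this, min_eq_left h]
  · have : b.toList < a.toList := by rw [← String.lt_iff_toList_lt]; exact h
    simp [PySem.List.sorted, PySem.List.insertBy, this, min_eq_right h.le]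


lemma pv_pointA (table : List String) (languages : List String) (preference : List Int)
    (hlen : languages.length ≤ preference.length) :
    (PySem.List.pyRange 0 (PySem.List.len languages) 1).foldl
        (fun (pt : List Int) i =>
          (PySem.List.pyRange 0 (PySem.List.len table) 1).foldl
            (fun (pt : List Int) j =>
              if (PySem.List.pyGetD (table.map (fun t => pvW (PySem.Str.split₀ t))) j
                    PySem.Dict.empty).get? (PySem.List.pyGetD languages i "") ≠ none then
                PySem.List.pySetD pt j (PySem.List.pyGetD pt j 0 +
                  PySem.List.pyGetD preference i 0 *
                    (PySem.List.pyGetD (table.map (fun t => pvW (PySem.Str.split₀ t))) j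
                      PySem.Dict.empty).getD (PySem.List.pyGetD languages i "") 0)
              else pt) pt)
        (PySem.List.pyRepeat [0] (PySem.List.len table))
      = table.map (fun t => pvRow (pvW (PySem.Str.split₀ t)) (languages.zip preference)) := by
  have hzl : (languages.zip preference).length = languages.length := by
    rw [List.length_zip]; omega
  have hcast : PySem.List.len languages = ((languages.zip preference).length : Int) := by
    rw [PySem.List.len_eq]; exact_mod_cast hzl.symm
  rw [hcast]
  have H : ∀ (pt : List Int) (i : Int),
      i ∈ PySem.List.pyRange 0 ((languages.zip preference).length : Int) 1 →
      (PySem.List.pyRange 0 (PySem.List.len table) 1).foldl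
            (fun (pt : List Int) j =>
              if (PySem.List.pyGetD (table.map (fun t => pvW (PySem.Str.split₀ t))) j
                    PySem.Dict.empty).get? (PySem.List.pyGetD languages i "") ≠ none then
                PySem.List.pySetD pt j (PySem.List.pyGetD pt j 0 +
                  PySem.List.pyGetD preference i 0 *
                    (PySem.List.pyGetD (table.map (fun t => pvW (PySem.Str.split₀ t))) j
                      PySem.Dict.empty).getD (PySem.List.pyGetD languages i "") 0)
              else pt) pt
        = (fun (pt : List Int) (lp : String × Int) =>
            (PySem.List.pyRange 0 (PySem.List.len table) 1).foldl
              (fun (pt : List Int) j =>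
                if (PySem.List.pyGetD (table.map (fun t => pvW (PySem.Str.split₀ t))) j
                      PySem.Dict.empty).get? lp.1 ≠ none then
                  PySem.List.pySetD pt j (PySem.List.pyGetD pt j 0 +
                    lp.2 * (PySem.List.pyGetD (table.map (fun t => pvW (PySem.Str.split₀ t))) j
                      PySem.Dict.empty).getD lp.1 0)
                else pt) pt)
            pt (PySem.List.pyGetD (languages.zip preference) i ("", 0)) := by
    intro pt i hi
    rw [PySem.List.mem_pyRange_one] at hi
    have hilt : i.toNat < (languages.zip preference).length := by omega
    have e0 : PySem.List.pyGetD (languages.zip preference) i ("", 0)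
        = (languages.zip preference)[i.toNat] :=
      PySem.List.pyGetD_eq_getElem _ _ hi.1 (by simpa using hi.2)
    have e1 : PySem.List.pyGetD languages i "" = languages[i.toNat]'(by omega) :=
      PySem.List.pyGetD_eq_getElem _ _ hi.1 (by exact_mod_cast (show i < (languages.length : Int) by omega))
    have e2 : PySem.List.pyGetD preference i 0 = preference[i.toNat]'(by omega) :=
      PySem.List.pyGetD_eq_getElem _ _ hi.1 (by exact_mod_cast (show i < (preference.length : Int) by omega))
    simp only [e0, List.getElem_zip, e1, e2]
  rw [PySem.List.foldl_congr_mem _ _ _ _ H]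
  rw [PySem.List.foldl_pyRange_zero_pyGetD' (languages.zip preference) ("", 0)
        (fun (pt : List Int) (lp : String × Int) =>
            (PySem.List.pyRange 0 (PySem.List.len table) 1).foldl
              (fun (pt : List Int) j =>
                if (PySem.List.pyGetD (table.map (fun t => pvW (PySem.Str.split₀ t))) j
                      PySem.Dict.empty).get? lp.1 ≠ none then
                  PySem.List.pySetD pt j (PySem.List.pyGetD pt j 0 +
                    lp.2 * (PySem.List.pyGetD (table.map (fun t => pvW (PySem.Str.split₀ t))) j
                      PySem.Dict.empty).getD lp.1 0)
                else pt) pt)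
        (PySem.List.pyRepeat [0] (PySem.List.len table))]
  have hrep : PySem.List.pyRepeat [(0 : Int)] (PySem.List.len table)
      = List.replicate table.length 0 := by
    rw [PySem.List.pyRepeat_singleton, PySem.List.len_eq]
    simp
  rw [hrep]
  have hbd : PySem.List.len table
      = ((table.map (fun t => pvW (PySem.Str.split₀ t))).length : Int) := by
    simp
  rw [hbd]
  rw [pv_outer (table.map (fun t => pvW (PySem.Str.split₀ t))) (languages.zip preference)
        (List.replicate table.length 0) (by simp)]
  apply List.ext_getElem
  · simp
  · intro j h1 h2
    simp

lemma pv_selA (fs : List String) (point : List Int) (h : point.length = fs.length) :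
    (PySem.List.pyRange 0 (PySem.List.len fs) 1).foldl
        (fun (s : Int × String) i =>
          if PySem.List.pyGetD point i 0 > s.1 then
            (PySem.List.pyGetD point i 0, PySem.List.pyGetD fs i "")
          else if PySem.List.pyGetD point i 0 = s.1 then
            (s.1, PySem.List.pyGetD
              (PySem.List.sorted [s.2, PySem.List.pyGetD fs i ""] (fun x => x) false) 0 "")
          else s) ((-1 : Int), "")
      = (fs.zip point).foldl pvSel ((-1 : Int), "") := by
  have hzl : (fs.zip point).length = fs.length := by
    rw [List.length_zip]; omega
  have hcast : PySem.List.len fs = ((fs.zip point).length : Int) := by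
    rw [PySem.List.len_eq]; exact_mod_cast hzl.symm
  rw [hcast]
  have H : ∀ (s : Int × String) (i : Int),
      i ∈ PySem.List.pyRange 0 ((fs.zip point).length : Int) 1 →
      (if PySem.List.pyGetD point i 0 > s.1 then
          (PySem.List.pyGetD point i 0, PySem.List.pyGetD fs i "")
        else if PySem.List.pyGetD point i 0 = s.1 then
          (s.1, PySem.List.pyGetD
            (PySem.List.sorted [s.2, PySem.List.pyGetD fs i ""] (fun x => x) false) 0 "")
        else s)
        = pvSel s (PySem.List.pyGetD (fs.zip point) i ("", 0)) := by
    intro s i hi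
    rw [PySem.List.mem_pyRange_one] at hi
    have e0 : PySem.List.pyGetD (fs.zip point) i ("", 0) = (fs.zip point)[i.toNat] :=
      PySem.List.pyGetD_eq_getElem _ _ hi.1 (by simpa using hi.2)
    have e1 : PySem.List.pyGetD fs i ""
        = fs[i.toNat]'(by have := hi.2; simp [hzl] at this ⊢; omega) :=
      PySem.List.pyGetD_eq_getElem _ _ hi.1
        (by have h2 := hi.2; rw [List.length_zip] at h2; push_cast at h2 ⊢; omega)
    have e2 : PySem.List.pyGetD point i 0
        = point[i.toNat]'(by have := hi.2; simp [hzl] at this ⊢; omega) :=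
      PySem.List.pyGetD_eq_getElem _ _ hi.1
        (by have h2 := hi.2; rw [List.length_zip] at h2; push_cast at h2 ⊢; omega)
    rw [e0, e1, e2]
    simp only [pvSel, List.getElem_zip, pv_min]
  rw [PySem.List.foldl_congr_mem _ _ _ _ H]
  rw [PySem.List.foldl_pyRange_zero_pyGetD' (fs.zip point) ("", 0) pvSel ((-1 : Int), "")]

-- ===== VERDICT (by name: the statement is the Claim_ definition above) =====
theorem solution_spec : Claim_equal_solution := by
  intro table languages preference hdom hpre
  obtain ⟨hsplit, hlen⟩ := hpre
  show solution table languages preference = solution_alt table languages preference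
  simp only [solution, solution_alt]
  rw [pv_rtl]
  dsimp only
  rw [pv_pointA table languages preference hlen]
  rw [pv_selA (table.map pvF)
        (table.map (fun t => pvRow (pvW (PySem.Str.split₀ t)) (languages.zip preference)))
        (by simp)]
  rw [List.zip_map', List.foldl_map]
  have hB : ∀ (s : Int × String) (line : String),
      (if (List.map (fun lw =>
            (List.foldl (fun (d : PySem.Dict String Int) lp =>
                d.insert lp.1 (d.getD lp.1 0 + lp.2)) PySem.Dict.empty
              (languages.zip preference)).getD lw.1 0 * lw.2)
            (List.foldl (fun (d : PySem.Dict String Int) jl => d.insert jl.2 (6 - jl.1))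
              PySem.Dict.empty
              (PySem.List.enumerate (PySem.List.slice (PySem.Str.split₀ line) (some 1) none) 1)).items).sum > s.1 then
        ((List.map (fun lw =>
            (List.foldl (fun (d : PySem.Dict String Int) lp =>
                d.insert lp.1 (d.getD lp.1 0 + lp.2)) PySem.Dict.empty
              (languages.zip preference)).getD lw.1 0 * lw.2)
            (List.foldl (fun (d : PySem.Dict String Int) jl => d.insert jl.2 (6 - jl.1))
              PySem.Dict.empty
              (PySem.List.enumerate (PySem.List.slice (PySem.Str.split₀ line) (some 1) none) 1)).items).sum,
          PySem.List.pyGetD (PySem.Str.split₀ line) 0 "")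
      else if (List.map (fun lw =>
            (List.foldl (fun (d : PySem.Dict String Int) lp =>
                d.insert lp.1 (d.getD lp.1 0 + lp.2)) PySem.Dict.empty
              (languages.zip preference)).getD lw.1 0 * lw.2)
            (List.foldl (fun (d : PySem.Dict String Int) jl => d.insert jl.2 (6 - jl.1))
              PySem.Dict.empty
              (PySem.List.enumerate (PySem.List.slice (PySem.Str.split₀ line) (some 1) none) 1)).items).sum = s.1 then
        (s.1, min s.2 (PySem.List.pyGetD (PySem.Str.split₀ line) 0 ""))
      else s)
      = pvSel s (pvF line, pvRow (pvW (PySem.Str.split₀ line)) (languages.zip preference)) := by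
    intro s line
    rw [pv_weights_eq (PySem.Str.split₀ line)]
    rw [pv_score_eq (pvW (PySem.Str.split₀ line)) (pv_nodup_keys_W _) (languages.zip preference)]
    rfl
  simp only [hB]
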